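-- pv_equiv track=rewrite | github.com/ddPn08/booruer | booruer/utils.py | tag_filter
-- ===== SOURCE A (Python) =====
-- def tag_filter(tag: str, filter: str):
--     filter = filter.split(" ")
--     for v in filter:
--         if v.startswith("-") and v[1:] in tag:
--             return False
--         if not v.startswith("-") and v not in tag:
--             return False
--
--     return True
-- ===== SOURCE B (Python) =====
-- def tag_filter(tag: str, filter: str):
--     def ok(term: str) -> bool:
--         if term.startswith("-"):
--             return term[1:] not in tag
--         return term in tag
--
--     buf = ""
--     for c in filter:
--         if c == " ":
--             if not ok(buf):
--                 return False
--             buf = ""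
--         else:
--             buf += c
--     return ok(buf)
-- ===== Notes on version B (the rewrite author's own statement) =====
-- stated objective: alternative
-- what changed: Instead of splitting the filter and looping over the resulting term list, B is a single character-level scan over the filter string that accumulates the current term in a buffer and judges it against the tag at each space boundary and at the end.
import Mathlib
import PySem

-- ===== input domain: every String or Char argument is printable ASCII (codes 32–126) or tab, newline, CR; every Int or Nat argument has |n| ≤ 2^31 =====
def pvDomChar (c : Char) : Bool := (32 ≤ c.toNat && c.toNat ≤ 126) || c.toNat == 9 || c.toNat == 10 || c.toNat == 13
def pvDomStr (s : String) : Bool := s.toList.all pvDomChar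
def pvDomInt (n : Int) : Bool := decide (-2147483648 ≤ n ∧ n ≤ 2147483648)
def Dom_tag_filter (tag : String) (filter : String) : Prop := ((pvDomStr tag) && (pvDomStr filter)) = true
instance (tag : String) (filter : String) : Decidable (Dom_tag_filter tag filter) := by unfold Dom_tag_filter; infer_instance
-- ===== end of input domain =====

-- B replaces split-then-loop by a single character-level scanner that accumulates each term and judges it at space boundaries (alternative decomposition, same cost).


-- ===== PORT A =====
-- A's for-loop with early returns, as structural recursion over the split terms
def tagFilterLoop (tag : String) : List String → Bool
  | [] => true
  | v :: rest =>
    if PySem.Str.startswith v "-" && PySem.Str.isIn (PySem.Str.slice v (some 1) none) tag then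
      false
    else if !PySem.Str.startswith v "-" && !PySem.Str.isIn v tag then
      false
    else
      tagFilterLoop tag rest

def tag_filter (tag : String) (filter : String) : Bool :=
  tagFilterLoop tag ((PySem.Str.split? filter " ").getD [])

-- ===== PORT B =====
-- B's inner 'ok': judge one completed term
def tagOk (tag : String) (term : String) : Bool :=
  if PySem.Str.startswith term "-" then
    !PySem.Str.isIn (PySem.Str.slice term (some 1) none) tag
  else
    PySem.Str.isIn term tag

-- B's inner 'go': recurse over the remaining characters, accumulating the current term in buf
def tagScan (tag : String) : List Char → String → Bool
  | [], buf => tagOk tag buf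
  | c :: rest, buf =>
    if c == ' ' then
      tagOk tag buf && tagScan tag rest ""
    else
      tagScan tag rest (buf.push c)

def tag_filter_alt (tag : String) (filter : String) : Bool :=
  tagScan tag filter.toList ""

-- ===== PRECONDITION & SPEC =====
def Spec_tag_filter (tag : String) (filter : String) (out : Bool) : Prop := out = tag_filter_alt tag filter
instance (tag : String) (filter : String) (out : Bool) : Decidable (Spec_tag_filter tag filter out) := by unfold Spec_tag_filter; infer_instance

-- ===== CLAIM (what is proved, stated in full; the proofs are below) =====
def Claim_equal_tag_filter : Prop := ∀ (tag : String) (filter : String), Dom_tag_filter tag filter → Spec_tag_filter tag filter (tag_filter tag filter)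

-- ===== LEMMAS AND PROOFS =====

-- reference split: what splitting on a single space produces, as a plain scan (cur is the current term, reversed)
def scanSplit : List Char → List Char → List (List Char)
  | [], cur => [cur.reverse]
  | c :: rest, cur => if c = ' ' then cur.reverse :: scanSplit rest [] else scanSplit rest (c :: cur)

theorem splitOn_go_space (l : List Char) : ∀ (fuel : Nat) (cur : List Char) (acc : List (List Char)),
    l.length < fuel →
    PySem.Chars.splitOn.go [' '] fuel l cur acc = acc.reverse ++ scanSplit l cur := by
  induction l with
  | nil =>
    intro fuel cur acc h
    match fuel with
    | fuel + 1 => simp [PySem.Chars.splitOn.go, scanSplit]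
  | cons c rest ih =>
    intro fuel cur acc h
    match fuel with
    | fuel + 1 =>
      by_cases hc : c = ' '
      · subst hc
        simp [PySem.Chars.splitOn.go, scanSplit, List.isPrefixOf,
          ih fuel [] (cur.reverse :: acc) (by simpa using Nat.lt_of_succ_lt_succ h)]
      · simp [PySem.Chars.splitOn.go, scanSplit, List.isPrefixOf, hc,
          ih fuel (c :: cur) acc (by simpa using Nat.lt_of_succ_lt_succ h)]
        exact fun h' => absurd h'.symm hc

-- A's loop steps one term at a time via B's judge
theorem tagFilterLoop_cons (tag v : String) (ts : List String) :
    tagFilterLoop tag (v :: ts) = (tagOk tag v && tagFilterLoop tag ts) := by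
  simp only [tagFilterLoop, tagOk]
  cases h : PySem.Str.startswith v "-" <;> simp_all

-- splitting on one space is exactly the scan
theorem split_space (s : String) :
    (PySem.Str.split? s " ").getD [] = (scanSplit s.toList []).map String.ofList := by
  have h := splitOn_go_space s.toList (s.length + 1) [] []
    (by rw [String.length_toList]; exact Nat.lt_succ_self _)
  simp only [List.reverse_nil, List.nil_append] at h
  simp [PySem.Str.split?, PySem.Chars.split?, PySem.Chars.splitOn, h]

-- B's scanner equals A's loop run over the scan of the remaining characters
theorem tagScan_eq (tag : String) (l : List Char) : ∀ buf : String,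
    tagScan tag l buf = tagFilterLoop tag ((scanSplit l buf.toList.reverse).map String.ofList) := by
  induction l with
  | nil =>
    intro buf
    simp [tagScan, scanSplit, tagFilterLoop_cons, tagFilterLoop]
  | cons c rest ih =>
    intro buf
    by_cases hc : c = ' '
    · subst hc
      simpa [tagScan, scanSplit, tagFilterLoop_cons] using congrArg (tagOk tag buf && ·) (ih "")
    · simpa [tagScan, scanSplit, hc] using ih (buf.push c)

-- ===== VERDICT (by name: the statement is the Claim_ definition above) =====
theorem tag_filter_spec : Claim_equal_tag_filter := by
  intro tag filter _
  unfold Spec_tag_filter tag_filter tag_filter_alt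
  rw [split_space, tagScan_eq]
  simp
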